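-- pv_equiv track=rewrite | github.com/tp9222/python-for-hackers | Terminal_Screenshot/Website_screenshot/website_screenshot.py | parse_ports_spec
-- ===== SOURCE A (Python) =====
-- def parse_ports_spec(spec):
--     """Parse '80', '80,443', '8000-8003' into sorted list of ints."""
--     if not spec:
--         return []
--     parts = spec.split(",")
--     ports = set()
--     for part in parts:
--         p = part.strip()
--         if not p:
--             continue
--         if "-" in p:
--             try:
--                 a, b = p.split("-", 1)
--                 a = int(a); b = int(b)
--                 if a > b:
--                     a, b = b, a
--                 for x in range(a, b + 1):
--                     if 1 <= x <= 65535: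
--                         ports.add(x)
--             except Exception:
--                 continue
--         else:
--             try:
--                 x = int(p)
--                 if 1 <= x <= 65535:
--                     ports.add(x)
--             except Exception:
--                 continue
--     return sorted(ports)
-- ===== SOURCE B (Python) =====
-- def parse_ports_spec(spec):
--     """Parse '80', '80,443', '8000-8003' into sorted list of ints."""
--     if not spec:
--         return []
--     ivs = []
--     for part in spec.split(","):
--         p = part.strip()
--         if not p:
--             continue
--         if "-" in p:
--             try:
--                 a, b = p.split("-", 1)
--                 a = int(a); b = int(b)
--             except Exception:
--                 continue
--             lo, hi = (b, a) if a > b else (a, b)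
--         else:
--             try:
--                 lo = int(p)
--             except Exception:
--                 continue
--             hi = lo
--         if lo < 1:
--             lo = 1
--         if hi > 65535:
--             hi = 65535
--         if lo <= hi:
--             ivs.append((lo, hi))
--     ivs.sort(key=lambda iv: iv[0])
--     out = []
--     cur = 0
--     for lo, hi in ivs:
--         start = lo if lo > cur else cur + 1
--         out.extend(range(start, hi + 1))
--         if hi > cur:
--             cur = hi
--     return out
-- ===== Notes on version B (the rewrite author's own statement) =====
-- stated objective: alternative
-- what changed: Replaces A's per-port hash-set accumulation plus final comparison sort with an interval sweep: each part is parsed into one clamped (lo,hi) interval, the intervals are sorted by their low end, and a single watermark sweep emits the union in increasing order, so no per-port container and no sort of ports is needed.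
import Mathlib
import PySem

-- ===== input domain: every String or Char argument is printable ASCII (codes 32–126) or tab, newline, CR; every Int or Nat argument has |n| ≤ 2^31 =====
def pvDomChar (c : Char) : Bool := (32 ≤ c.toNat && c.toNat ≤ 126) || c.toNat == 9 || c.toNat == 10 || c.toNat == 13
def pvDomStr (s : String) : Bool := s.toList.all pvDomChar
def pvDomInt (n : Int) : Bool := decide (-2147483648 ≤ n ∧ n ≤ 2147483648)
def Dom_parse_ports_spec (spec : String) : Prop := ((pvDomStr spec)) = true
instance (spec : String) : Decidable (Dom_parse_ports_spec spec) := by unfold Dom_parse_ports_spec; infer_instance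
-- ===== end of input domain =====

-- B replaces A's per-port set accumulation plus final sort by an interval sweep: each part is parsed
-- into one clamped (lo,hi) interval, the intervals are sorted by their low end, and one watermark
-- sweep emits the union in increasing order; return values agree on every input.

-- ===== PORT A =====
-- the body of A's inner 'for x in range(a, b+1)' loop
def pvAddStep (ports : PySem.Set Int) (x : Int) : PySem.Set Int :=
  if 1 ≤ x ∧ x ≤ 65535 then PySem.Set.add ports x else ports

-- A's 'if a > b: a, b = b, a' swap followed by the range loop
def pvRangeLoopA (ports : PySem.Set Int) (a b : Int) : PySem.Set Int :=
  match (if a > b then (b, a) else (a, b)) with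
  | (a, b) => (PySem.List.pyRange a (b + 1) 1).foldl pvAddStep ports

-- A's 'a = int(a); b = int(b)' (a 'none' = the caught ValueError = continue)
def pvPairA (ports : PySem.Set Int) (sa sb : String) : PySem.Set Int :=
  match PySem.Int.ofStr? sa, PySem.Int.ofStr? sb with
  | some a, some b => pvRangeLoopA ports a b
  | _, _ => ports

-- the body of A's 'for part in parts' loop (a failing unpack/int = the caught exception = continue)
def pvPartA (ports : PySem.Set Int) (part : String) : PySem.Set Int :=
  let p := PySem.Str.strip part
  if p = "" then ports
  else if PySem.Str.isIn "-" p then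
    match PySem.Str.splitMax? p "-" 1 with
    | some [sa, sb] => pvPairA ports sa sb
    | _ => ports
  else
    match PySem.Int.ofStr? p with
    | some x => if 1 ≤ x ∧ x ≤ 65535 then PySem.Set.add ports x else ports
    | none => ports

def parse_ports_spec (spec : String) : List Int :=
  if spec = "" then []
  else
    let parts := (PySem.Str.splitMax? spec "," (-1)).getD []
    PySem.List.sorted (parts.foldl pvPartA PySem.Set.empty) (fun x => x) false

-- ===== PORT B =====
-- B's clamp of an interval to 1..65535 and the conditional append
def pvClampAppend (ivs : List (Int × Int)) (lo hi : Int) : List (Int × Int) :=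
  let lo := if lo < 1 then 1 else lo
  let hi := if hi > 65535 then 65535 else hi
  if lo ≤ hi then ivs ++ [(lo, hi)] else ivs

-- B's 'a = int(a); b = int(b)' and the swap '(b, a) if a > b else (a, b)'
-- B's swap '(b, a) if a > b else (a, b)' followed by the clamped append
def pvSwapClamp (ivs : List (Int × Int)) (a b : Int) : List (Int × Int) :=
  match (if a > b then (b, a) else (a, b)) with
  | (lo, hi) => pvClampAppend ivs lo hi

def pvPairB (ivs : List (Int × Int)) (sa sb : String) : List (Int × Int) :=
  match PySem.Int.ofStr? sa, PySem.Int.ofStr? sb with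
  | some a, some b => pvSwapClamp ivs a b
  | _, _ => ivs

-- the body of B's parsing loop 'for part in spec.split(",")'
def pvPartB (ivs : List (Int × Int)) (part : String) : List (Int × Int) :=
  let p := PySem.Str.strip part
  if p = "" then ivs
  else if PySem.Str.isIn "-" p then
    match PySem.Str.splitMax? p "-" 1 with
    | some [sa, sb] => pvPairB ivs sa sb
    | _ => ivs
  else
    match PySem.Int.ofStr? p with
    | some x => pvClampAppend ivs x x
    | none => ivs

-- the body of B's sweep loop: state (out, cur), 'out.extend(range(start, hi+1)); cur = max(cur, hi)'
def pvSweepStep (st : List Int × Int) (iv : Int × Int) : List Int × Int :=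
  let start := if iv.1 > st.2 then iv.1 else st.2 + 1
  (st.1 ++ PySem.List.pyRange start (iv.2 + 1) 1, if iv.2 > st.2 then iv.2 else st.2)

def parse_ports_spec_alt (spec : String) : List Int :=
  if spec = "" then []
  else
    let ivs := ((PySem.Str.splitMax? spec "," (-1)).getD []).foldl pvPartB []
    let ivs := PySem.List.sorted ivs (fun iv => iv.1) false
    (ivs.foldl pvSweepStep ([], 0)).1

-- ===== PRECONDITION & SPEC =====
def Spec_parse_ports_spec (spec : String) (out : List Int) : Prop := out = parse_ports_spec_alt spec
instance (spec : String) (out : List Int) : Decidable (Spec_parse_ports_spec spec out) := by unfold Spec_parse_ports_spec; infer_instance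

-- ===== CLAIM (what is proved, stated in full; the proofs are below) =====
def Claim_equal_parse_ports_spec : Prop := ∀ (spec : String), Dom_parse_ports_spec spec → Spec_parse_ports_spec spec (parse_ports_spec spec)

-- ===== LEMMAS AND PROOFS =====

-- 'x is covered by one of the intervals'
def pvCov (ivs : List (Int × Int)) (x : Int) : Bool :=
  ivs.any (fun iv => decide (iv.1 ≤ x) && decide (x ≤ iv.2))

theorem pvCov_iff (ivs : List (Int × Int)) (x : Int) :
    pvCov ivs x = true ↔ ∃ iv ∈ ivs, iv.1 ≤ x ∧ x ≤ iv.2 := by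
  simp [pvCov]

-- membership in A's fold of the inner range loop (as in the source: clamped by the 1..65535 filter)
theorem pvAdd_fold_mem (r : List Int) (s : PySem.Set Int) (y : Int) :
    y ∈ r.foldl pvAddStep s ↔ y ∈ s ∨ (y ∈ r ∧ 1 ≤ y ∧ y ≤ 65535) := by
  induction r generalizing s with
  | nil => simp
  | cons z t ih =>
    simp only [List.foldl_cons, ih, pvAddStep, List.mem_cons]
    split_ifs with h
    · rw [PySem.Set.mem_add]
      constructor
      · rintro ((hy | rfl) | ⟨ht, hb⟩)
        · exact Or.inl hy
        · exact Or.inr ⟨Or.inl rfl, h⟩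
        · exact Or.inr ⟨Or.inr ht, hb⟩
      · rintro (hy | ⟨rfl | ht, hb⟩)
        · exact Or.inl (Or.inl hy)
        · exact Or.inl (Or.inr rfl)
        · exact Or.inr ⟨ht, hb⟩
    · constructor
      · rintro (hy | ⟨ht, hb⟩)
        · exact Or.inl hy
        · exact Or.inr ⟨Or.inr ht, hb⟩
      · rintro (hy | ⟨rfl | ht, hb⟩)
        · exact Or.inl hy
        · exact absurd hb h
        · exact Or.inr ⟨ht, hb⟩

theorem pvAdd_fold_nodup (r : List Int) (s : PySem.Set Int) (h : s.Nodup) :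
    (r.foldl pvAddStep s).Nodup := by
  induction r generalizing s with
  | nil => exact h
  | cons z t ih =>
    simp only [List.foldl_cons, pvAddStep]
    split_ifs with hz
    · exact ih _ (PySem.Set.nodup_add s z h)
    · exact ih _ h

-- the invariant tying A's set of collected ports to B's interval list
def pvRel (s : PySem.Set Int) (ivs : List (Int × Int)) : Prop :=
  s.Nodup ∧ (∀ x : Int, x ∈ s ↔ pvCov ivs x = true) ∧
  (∀ iv ∈ ivs, 1 ≤ iv.1 ∧ iv.1 ≤ iv.2 ∧ iv.2 ≤ 65535)

theorem pvCov_append (ivs : List (Int × Int)) (iv : Int × Int) (x : Int) :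
    pvCov (ivs ++ [iv]) x = true ↔ pvCov ivs x = true ∨ (iv.1 ≤ x ∧ x ≤ iv.2) := by
  simp [pvCov]

-- one clamped-append on B's side matches one swap-plus-range-loop on A's side
theorem pvRel_interval (s : PySem.Set Int) (ivs : List (Int × Int)) (h : pvRel s ivs)
    (lo hi : Int) (hlh : lo ≤ hi) :
    pvRel ((PySem.List.pyRange lo (hi + 1) 1).foldl pvAddStep s) (pvClampAppend ivs lo hi) := by
  obtain ⟨hnd, hmem, hW⟩ := h
  unfold pvClampAppend
  set lo' := if lo < 1 then 1 else lo with hlo'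
  set hi' := if hi > 65535 then 65535 else hi with hhi'
  have hcl : ∀ x : Int, (lo' ≤ x ∧ x ≤ hi') ↔ (lo ≤ x ∧ x ≤ hi ∧ 1 ≤ x ∧ x ≤ 65535) := by
    intro x; rw [hlo', hhi']; split_ifs <;> omega
  have hb1 : 1 ≤ lo' := by rw [hlo']; split_ifs <;> omega
  have hb2 : hi' ≤ 65535 := by rw [hhi']; split_ifs <;> omega
  by_cases hne : lo' ≤ hi'
  · rw [if_pos hne]
    refine ⟨pvAdd_fold_nodup _ _ hnd, ?_, ?_⟩
    · intro x
      rw [pvAdd_fold_mem, pvCov_append, hmem, PySem.List.mem_pyRange_one]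
      constructor
      · rintro (hx | ⟨⟨h1, h2⟩, hb⟩)
        · exact Or.inl hx
        · exact Or.inr ((hcl x).mpr ⟨h1, by omega, hb⟩)
      · rintro (hx | hx)
        · exact Or.inl hx
        · rcases (hcl x).mp hx with ⟨h1, h2, hb⟩
          exact Or.inr ⟨⟨h1, by omega⟩, hb⟩
    · intro iv hiv
      rcases List.mem_append.mp hiv with hiv | hiv
      · exact hW iv hiv
      · simp only [List.mem_singleton] at hiv
        subst hiv
        exact ⟨hb1, hne, hb2⟩
  · rw [if_neg hne]
    refine ⟨pvAdd_fold_nodup _ _ hnd, ?_, hW⟩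
    intro x
    rw [pvAdd_fold_mem, hmem, PySem.List.mem_pyRange_one]
    constructor
    · rintro (hx | ⟨⟨h1, h2⟩, hb⟩)
      · exact hx
      · have hx' := (hcl x).mpr ⟨h1, by omega, hb⟩
        exact absurd (hx'.1.trans hx'.2) hne
    · exact Or.inl

-- the swap: A's 'a, b = b, a' range loop vs B's clamped append, both after the same swap
theorem pvRel_swapAB (s : PySem.Set Int) (ivs : List (Int × Int)) (h : pvRel s ivs)
    (a b : Int) : pvRel (pvRangeLoopA s a b) (pvSwapClamp ivs a b) := by
  unfold pvRangeLoopA pvSwapClamp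
  by_cases hab : a > b
  · rw [if_pos hab]; exact pvRel_interval s ivs h b a (by omega)
  · rw [if_neg hab]; exact pvRel_interval s ivs h a b (by omega)

-- the pair branch: A's swap+range loop vs B's swap+clamped append
theorem pvRel_pairAB (s : PySem.Set Int) (ivs : List (Int × Int)) (h : pvRel s ivs)
    (sa sb : String) : pvRel (pvPairA s sa sb) (pvPairB ivs sa sb) := by
  unfold pvPairA pvPairB
  rcases ha : PySem.Int.ofStr? sa with _ | a <;> rcases hb : PySem.Int.ofStr? sb with _ | b
  · exact h
  · exact h
  · exact h
  · exact pvRel_swapAB s ivs h a b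

-- the single-port branch: A's guarded add vs B's clamped append of (x, x)
theorem pvRel_single (s : PySem.Set Int) (ivs : List (Int × Int)) (h : pvRel s ivs) (x : Int) :
    pvRel (if 1 ≤ x ∧ x ≤ 65535 then s.add x else s) (pvClampAppend ivs x x) := by
  obtain ⟨hnd, hmem, hW⟩ := h
  unfold pvClampAppend
  by_cases hbnd : 1 ≤ x ∧ x ≤ 65535
  · rw [if_pos hbnd]
    have hlo : (if x < 1 then 1 else x) = x := by omega
    have hhi : (if x > 65535 then 65535 else x) = x := by omega
    rw [hlo, hhi, if_pos (le_refl x)]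
    refine ⟨PySem.Set.nodup_add s x hnd, ?_, ?_⟩
    · intro y
      rw [PySem.Set.mem_add, pvCov_append, hmem]
      constructor
      · rintro (hy | rfl)
        · exact Or.inl hy
        · exact Or.inr ⟨le_refl _, le_refl _⟩
      · rintro (hy | ⟨h1, h2⟩)
        · exact Or.inl hy
        · exact Or.inr (by omega)
    · intro iv hiv
      rcases List.mem_append.mp hiv with hiv | hiv
      · exact hW iv hiv
      · simp only [List.mem_singleton] at hiv
        subst hiv
        exact ⟨hbnd.1, le_refl _, hbnd.2⟩
  · rw [if_neg hbnd]
    have : ¬ ((if x < 1 then 1 else x) ≤ (if x > 65535 then 65535 else x)) := by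
      split_ifs <;> omega
    rw [if_neg this]
    exact ⟨hnd, hmem, hW⟩

-- one part of the spec preserves the invariant
theorem pvRel_step (s : PySem.Set Int) (ivs : List (Int × Int)) (h : pvRel s ivs) (part : String) :
    pvRel (pvPartA s part) (pvPartB ivs part) := by
  unfold pvPartA pvPartB
  by_cases hp : PySem.Str.strip part = ""
  · rw [if_pos hp, if_pos hp]; exact h
  · rw [if_neg hp, if_neg hp]
    by_cases hd : PySem.Str.isIn "-" (PySem.Str.strip part) = true
    · rw [if_pos hd, if_pos hd]
      rcases hsp : PySem.Str.splitMax? (PySem.Str.strip part) "-" 1 with _ | l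
      · exact h
      · match l with
        | [] => exact h
        | [sa] => exact h
        | sa :: sb :: c :: t => exact h
        | [sa, sb] => exact pvRel_pairAB s ivs h sa sb
    · rw [if_neg hd, if_neg hd]
      rcases hx : PySem.Int.ofStr? (PySem.Str.strip part) with _ | x
      · exact h
      · exact pvRel_single s ivs h x

theorem pvRel_fold (parts : List String) (s : PySem.Set Int) (ivs : List (Int × Int))
    (h : pvRel s ivs) : pvRel (parts.foldl pvPartA s) (parts.foldl pvPartB ivs) := by
  induction parts generalizing s ivs with
  | nil => exact h
  | cons p t ih => exact ih _ _ (pvRel_step s ivs h p)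

theorem pvRel_empty : pvRel PySem.Set.empty [] := by
  refine ⟨List.nodup_nil, ?_, by simp⟩
  intro x; simp [PySem.Set.empty, pvCov]

-- A's sorted set is the ordered scan of 1..65535 filtered by membership
theorem pvA_eq_filter (s : PySem.Set Int) (ivs : List (Int × Int)) (h : pvRel s ivs) :
    PySem.List.sorted s (fun x => x) false
      = (PySem.List.pyRange 1 65536 1).filter (fun x => pvCov ivs x) := by
  obtain ⟨hnd, hmem, hW⟩ := h
  apply PySem.List.sorted_eq_of_perm_of_pairwise_lt
  · rw [List.perm_ext_iff_of_nodup ((PySem.List.nodup_pyRange_one _ _).filter _) hnd]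
    intro y
    simp only [List.mem_filter, PySem.List.mem_pyRange_one]
    constructor
    · rintro ⟨_, hy⟩; exact (hmem y).mpr hy
    · intro hy
      have hc := (hmem y).mp hy
      rcases (pvCov_iff ivs y).mp hc with ⟨iv, hiv, h1, h2⟩
      have := hW iv hiv
      exact ⟨⟨by omega, by omega⟩, hc⟩
  · exact (PySem.List.pairwise_lt_pyRange_one _ _).filter _

-- the sweep: starting from a correct (out, cur) state, the fold produces the filtered full range
theorem pvSweep (ivs : List (Int × Int)) (C : Int → Bool) (cur : Int) (out : List Int)
    (hW : ∀ iv ∈ ivs, 1 ≤ iv.1 ∧ iv.1 ≤ iv.2 ∧ iv.2 ≤ 65535)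
    (hP : List.Pairwise (fun p q : Int × Int => p.1 ≤ q.1) ivs)
    (hcur : 0 ≤ cur ∧ cur ≤ 65535)
    (hC1 : ∀ x, C x = true → 1 ≤ x ∧ x ≤ cur)
    (hC2 : ∀ iv ∈ ivs, ∀ x, iv.1 ≤ x → x ≤ cur → C x = true)
    (hout : out = (PySem.List.pyRange 1 (cur + 1) 1).filter C) :
    (ivs.foldl pvSweepStep (out, cur)).1
      = (PySem.List.pyRange 1 65536 1).filter (fun x => C x || pvCov ivs x) := by
  induction ivs generalizing C cur out with
  | nil =>
    have hcg : (fun x => C x || pvCov ([] : List (Int × Int)) x) = C := by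
      funext x; simp [pvCov]
    simp only [List.foldl_nil, hcg]
    rw [hout, PySem.List.pyRange_one_append 1 (cur + 1) 65536 (by omega) (by omega),
        List.filter_append]
    have h2 : (PySem.List.pyRange (cur + 1) 65536 1).filter C = [] := by
      rw [List.filter_eq_nil_iff]
      intro x hx hc
      have := PySem.List.mem_pyRange_one.mp hx
      have := hC1 x hc
      omega
    rw [h2, List.append_nil]
  | cons iv t ih =>
    obtain ⟨lo, hi⟩ := iv
    obtain ⟨hw1, hw2, hw3⟩ := hW (lo, hi) List.mem_cons_self
    simp only at hw1 hw2 hw3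
    have hWt : ∀ p ∈ t, 1 ≤ p.1 ∧ p.1 ≤ p.2 ∧ p.2 ≤ 65535 :=
      fun p hp => hW p (List.mem_cons_of_mem _ hp)
    have hPlo : ∀ p ∈ t, lo ≤ p.1 := fun p hp => (List.pairwise_cons.mp hP).1 p hp
    have hPt := (List.pairwise_cons.mp hP).2
    have hChead : ∀ x, lo ≤ x → x ≤ cur → C x = true :=
      hC2 (lo, hi) List.mem_cons_self
    rw [List.foldl_cons]
    have hstep : pvSweepStep (out, cur) (lo, hi)
        = (out ++ PySem.List.pyRange (if lo > cur then lo else cur + 1) (hi + 1) 1,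
           if hi > cur then hi else cur) := rfl
    rw [hstep]
    set cur' : Int := if hi > cur then hi else cur with hcur'
    have hcurle : cur ≤ cur' := by rw [hcur']; split_ifs <;> omega
    have hcur'le : cur' ≤ 65535 := by rw [hcur']; split_ifs <;> omega
    set C' : Int → Bool := fun x => C x || (decide (lo ≤ x) && decide (x ≤ hi)) with hC'def
    have hC'x : ∀ x, C' x = (C x || (decide (lo ≤ x) && decide (x ≤ hi))) := fun x => rfl
    have hCC' : ∀ x, 1 ≤ x → x ≤ cur → C' x = C x := by
      intro x hx1 hx2
      rw [hC'x]
      by_cases hd : lo ≤ x ∧ x ≤ hi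
      · simp [hd.1, hd.2, hChead x hd.1 hx2]
      · rcases not_and_or.mp hd with hd | hd <;> simp [hd]
    have hC1' : ∀ x, C' x = true → 1 ≤ x ∧ x ≤ cur' := by
      intro x hx
      rw [hC'x] at hx
      simp only [Bool.or_eq_true, Bool.and_eq_true, decide_eq_true_eq] at hx
      rcases hx with hx | hx
      · have := hC1 x hx; omega
      · rw [hcur']; constructor
        · omega
        · split_ifs <;> omega
    have hC2' : ∀ p ∈ t, ∀ x, p.1 ≤ x → x ≤ cur' → C' x = true := by
      intro p hp x hx1 hx2
      have hlop := hPlo p hp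
      rw [hC'x]
      by_cases hxc : x ≤ cur
      · rw [hChead x (by omega) hxc, Bool.true_or]
      · have hhic : cur' = hi := by
          rw [hcur']
          split_ifs with hgt
          · rfl
          · rw [hcur', if_neg hgt] at hx2; omega
        rw [hhic] at hx2
        simp [show lo ≤ x by omega, hx2]
    have hfirst : (PySem.List.pyRange 1 (cur + 1) 1).filter C'
        = (PySem.List.pyRange 1 (cur + 1) 1).filter C := by
      apply List.filter_congr
      intro x hx
      have hxb := PySem.List.mem_pyRange_one.mp hx
      exact hCC' x hxb.1 (by omega)
    have hout' : out ++ PySem.List.pyRange (if lo > cur then lo else cur + 1) (hi + 1) 1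
        = (PySem.List.pyRange 1 (cur' + 1) 1).filter C' := by
      by_cases hhc : hi > cur
      · have hc1 : cur' = hi := by rw [hcur', if_pos hhc]
        rw [hc1, PySem.List.pyRange_one_append 1 (cur + 1) (hi + 1) (by omega) (by omega),
            List.filter_append, hfirst, ← hout]
        congr 1
        have hsecond : (PySem.List.pyRange (cur + 1) (hi + 1) 1).filter C'
            = (PySem.List.pyRange (cur + 1) (hi + 1) 1).filter (fun x => decide (lo ≤ x)) := by
          apply List.filter_congr
          intro x hx
          have hxb := PySem.List.mem_pyRange_one.mp hx
          have hcx : C x = false := by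
            rcases Bool.eq_false_or_eq_true (C x) with hcx | hcx
            · have := hC1 x hcx; omega
            · exact hcx
          rw [hC'x, hcx, Bool.false_or, decide_eq_true (show x ≤ hi by omega), Bool.and_true]
        by_cases hloc : lo > cur
        · rw [hsecond, if_pos hloc,
              PySem.List.pyRange_one_append (cur + 1) lo (hi + 1) (by omega) (by omega),
              List.filter_append]
          have hn : (PySem.List.pyRange (cur + 1) lo 1).filter (fun x => decide (lo ≤ x)) = [] := by
            rw [List.filter_eq_nil_iff]
            intro x hx hc
            have := PySem.List.mem_pyRange_one.mp hx
            simp only [decide_eq_true_eq] at hc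
            omega
          have hall : (PySem.List.pyRange lo (hi + 1) 1).filter (fun x => decide (lo ≤ x))
              = PySem.List.pyRange lo (hi + 1) 1 := by
            apply List.filter_eq_self.mpr
            intro x hx
            have := PySem.List.mem_pyRange_one.mp hx
            simp only [decide_eq_true_eq]
            omega
          rw [hn, hall, List.nil_append]
        · rw [hsecond, if_neg hloc]
          symm
          apply List.filter_eq_self.mpr
          intro x hx
          have := PySem.List.mem_pyRange_one.mp hx
          simp only [decide_eq_true_eq]
          omega
      · have hc1 : cur' = cur := by rw [hcur', if_neg hhc]
        have hstart : ¬ lo > cur := by omega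
        rw [if_neg hstart, PySem.List.pyRange_one_eq_nil (by omega), List.append_nil,
            hc1, hfirst, hout]
    rw [ih C' cur' _ hWt hPt ⟨by omega, hcur'le⟩ hC1' hC2' hout']
    apply List.filter_congr
    intro x _
    rw [hC'x, pvCov, pvCov, List.any_cons, Bool.or_assoc]

-- ===== VERDICT (by name: the statement is the Claim_ definition above) =====
theorem parse_ports_spec_spec : Claim_equal_parse_ports_spec := by
  intro spec _
  unfold Spec_parse_ports_spec parse_ports_spec parse_ports_spec_alt
  by_cases hs : spec = ""
  · rw [if_pos hs, if_pos hs]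
  · rw [if_neg hs, if_neg hs]
    set parts := (PySem.Str.splitMax? spec "," (-1)).getD [] with hparts
    set ivs := parts.foldl pvPartB [] with hivs
    have hrel := pvRel_fold parts PySem.Set.empty [] pvRel_empty
    rw [← hivs] at hrel
    set sivs := PySem.List.sorted ivs (fun iv => iv.1) false with hsivs
    have hmemS : ∀ p : Int × Int, p ∈ sivs ↔ p ∈ ivs := by
      intro p; rw [hsivs, PySem.List.mem_sorted]
    have hcovS : ∀ x, pvCov sivs x = pvCov ivs x := by
      intro x
      rw [Bool.eq_iff_iff, pvCov_iff, pvCov_iff]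
      constructor
      · rintro ⟨p, hp, h⟩; exact ⟨p, (hmemS p).mp hp, h⟩
      · rintro ⟨p, hp, h⟩; exact ⟨p, (hmemS p).mpr hp, h⟩
    have hB : (sivs.foldl pvSweepStep ([], 0)).1
        = (PySem.List.pyRange 1 65536 1).filter (fun x => pvCov ivs x) := by
      rw [pvSweep sivs (fun _ => false) 0 []
          (fun p hp => hrel.2.2 p ((hmemS p).mp hp))
          (PySem.List.sorted_pairwise ivs (fun iv => iv.1))
          ⟨le_refl 0, by omega⟩
          (fun x hx => by simp at hx)
          (fun p hp x hx1 hx2 => absurd (hrel.2.2 p ((hmemS p).mp hp)).1 (by omega))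
          (by rw [PySem.List.pyRange_one_eq_nil (by omega)]; rfl)]
      apply List.filter_congr
      intro x _
      rw [Bool.false_or, hcovS]
    rw [hB, pvA_eq_filter _ ivs hrel]
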